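-- pv_equiv track=rewrite | github.com/Fondamenti18/fondamenti-di-programmazione | students/1721561/homework04/program01.py | gen_dict_levels
-- ===== SOURCE A (Python) =====
-- def gen_dict_levels(dictionary,node,level,dict_levels):
--
-- #	if dict_levels is None:
-- #		dict_levels = {}
--
-- 	if level in dict_levels.keys():
-- 		dict_levels[level].append(node)
--
-- 	else:
-- 		dict_levels[level] = [node]
--
-- 	for child in dictionary[node]:
-- 		gen_dict_levels(dictionary,child,str(int(level)+1),dict_levels)
--
-- 	return dict_levels
-- ===== SOURCE B (Python) =====
-- def gen_dict_levels(dictionary, node, level, dict_levels):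
--     stack = [(node, level)]
--     while stack:
--         n, l = stack.pop()
--         if l in dict_levels:
--             dict_levels[l].append(n)
--         else:
--             dict_levels[l] = [n]
--         for c in reversed(dictionary[n]):
--             stack.append((c, str(int(l) + 1)))
--     return dict_levels
-- ===== Notes on version B (the rewrite author's own statement) =====
-- stated objective: alternative
-- what changed: The recursive DFS is replaced by an iterative traversal with an explicit worklist of (node, level) pairs (children pushed in reverse so per-level append order is preserved), mutating the same dict_levels.
import Mathlib
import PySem

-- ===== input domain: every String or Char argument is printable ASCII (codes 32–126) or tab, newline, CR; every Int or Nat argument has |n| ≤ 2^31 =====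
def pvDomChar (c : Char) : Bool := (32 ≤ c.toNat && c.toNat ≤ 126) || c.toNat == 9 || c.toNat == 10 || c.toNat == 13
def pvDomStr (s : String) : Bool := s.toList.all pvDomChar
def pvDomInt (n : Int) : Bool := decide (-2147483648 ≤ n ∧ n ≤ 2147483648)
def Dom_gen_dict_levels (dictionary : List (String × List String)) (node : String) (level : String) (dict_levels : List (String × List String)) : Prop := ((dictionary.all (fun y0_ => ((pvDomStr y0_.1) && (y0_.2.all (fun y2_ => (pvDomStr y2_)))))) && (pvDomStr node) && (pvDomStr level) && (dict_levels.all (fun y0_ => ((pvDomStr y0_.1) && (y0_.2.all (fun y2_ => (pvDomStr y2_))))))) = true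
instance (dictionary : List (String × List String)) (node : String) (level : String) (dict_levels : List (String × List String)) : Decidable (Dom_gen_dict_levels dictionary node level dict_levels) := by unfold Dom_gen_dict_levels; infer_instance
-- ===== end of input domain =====

-- B replaces A's recursive DFS by an iterative explicit-worklist traversal (same per-level order);
-- both Pythons mutate dict_levels in place identically, and the equivalence is about the returned value.
-- Raising is modelled by Option: a 'none' result stands for A's KeyError/ValueError/non-termination,
-- all of which lie outside Pre_; the fuel arguments are pure totality guards.

-- ===== PORT A =====
-- if level in dict_levels.keys(): dict_levels[level].append(node) else: dict_levels[level] = [node]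
def pvAddLevel (d : PySem.Dict String (List String)) (level node : String) : PySem.Dict String (List String) :=
  if PySem.Dict.contains d level then PySem.Dict.modify d level [] (fun xs => xs ++ [node])
  else PySem.Dict.insert d level [node]

-- literal recursion of A; none = raise (KeyError on missing node, ValueError on int(level)) or fuel out
def genAFuel (dictionary : PySem.Dict String (List String)) : Nat → String → String → PySem.Dict String (List String) → Option (PySem.Dict String (List String))
  | 0, _, _, _ => none
  | Nat.succ f, node, level, d =>
    let d1 := pvAddLevel d level node
    match PySem.Dict.get? dictionary node with
    | none => none
    | some children =>
        children.foldl (fun acc c =>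
          acc.bind (fun dd =>
            match PySem.Int.ofStr? level with
            | none => none
            | some v => genAFuel dictionary f c (PySem.Int.toStr (v + 1)) dd)) (some d1)

def gen_dict_levels (dictionary : List (String × List String)) (node : String) (level : String) (dict_levels : List (String × List String)) : List (String × List String) :=
  ((genAFuel (PySem.Dict.mk dictionary) (dictionary.length + 2) node level (PySem.Dict.mk dict_levels)).getD (PySem.Dict.mk dict_levels)).items

-- ===== PORT B =====
-- max branching, used only to build the termination measure of the worklist loop
def pvMaxBr (dictionary : PySem.Dict String (List String)) : Nat :=
  dictionary.items.foldl (fun m p => max m p.2.length) 0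

def pvWeight (b : Nat) (stack : List (Nat × String × String)) : Nat :=
  (stack.map (fun e => (b + 1) ^ e.1)).sum

theorem pvFoldlMax_init_le (l : List (String × List String)) : ∀ init : Nat,
    init ≤ l.foldl (fun m p => max m p.2.length) init := by
  induction l with
  | nil => intro init; simp
  | cons q qs ih => intro init; exact le_trans (le_max_left _ _) (ih _)

theorem pvMem_le_foldlMax (l : List (String × List String)) (p : String × List String)
    (hp : p ∈ l) : ∀ init : Nat, p.2.length ≤ l.foldl (fun m q => max m q.2.length) init := by
  induction l with
  | nil => cases hp
  | cons q qs ih =>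
    intro init
    rcases List.mem_cons.mp hp with h | h
    · subst h
      exact le_trans (le_max_right _ _) (pvFoldlMax_init_le qs _)
    · exact ih h _

theorem pvMem_of_get?_mk (l : List (String × List String)) (n : String) (cs : List String)
    (h : PySem.Dict.get? (PySem.Dict.mk l) n = some cs) : (n, cs) ∈ l := by
  induction l with
  | nil => simp [PySem.Dict.get?] at h
  | cons q qs ih =>
    rw [show PySem.Dict.mk (q :: qs) = PySem.Dict.mk ((q.1, q.2) :: qs) by rfl,
      PySem.Dict.get?_mk_cons] at h
    by_cases hq : q.1 = n
    · simp [hq] at h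
      exact List.mem_cons.mpr (Or.inl (by cases q; simp_all))
    · simp [hq] at h
      exact List.mem_cons.mpr (Or.inr (ih h))

theorem pvLen_le_maxBr (dictionary : PySem.Dict String (List String)) (n : String) (cs : List String)
    (h : PySem.Dict.get? dictionary n = some cs) : cs.length ≤ pvMaxBr dictionary := by
  cases dictionary with
  | mk l =>
    have hm : (n, cs) ∈ l := pvMem_of_get?_mk l n cs h
    exact pvMem_le_foldlMax l (n, cs) hm 0

-- while stack: pop (n,l); add; push children (reversed in Python = front of the Lean list);
-- each entry carries its fuel (a totality guard); none = raise / fuel out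
def genBLoop (dictionary : PySem.Dict String (List String)) (stack : List (Nat × String × String)) (d : PySem.Dict String (List String)) : Option (PySem.Dict String (List String)) :=
  match stack with
  | [] => some d
  | (0, _, _) :: _ => none
  | (Nat.succ f, n, l) :: rest =>
    let d1 := pvAddLevel d l n
    match h : PySem.Dict.get? dictionary n with
    | none => none
    | some children =>
      -- Python computes str(int(l)+1) per pushed child, so int(l) is never evaluated for a childless node
      if children.isEmpty then genBLoop dictionary rest d1
      else
        match PySem.Int.ofStr? l with
        | none => none
        | some v => genBLoop dictionary ((children.map (fun c => (f, c, PySem.Int.toStr (v + 1)))) ++ rest) d1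
  termination_by pvWeight (pvMaxBr dictionary) stack
  decreasing_by
  · simp [pvWeight]
  · have hb := pvLen_le_maxBr dictionary n children h
    have hx : 0 < (pvMaxBr dictionary + 1) ^ f := pow_pos (Nat.succ_pos _) f
    simp only [pvWeight, List.map_append, List.sum_append, List.map_map, Function.comp_def]
    have hconst : ((children.map (fun _ => (pvMaxBr dictionary + 1) ^ f)).sum)
        = children.length * (pvMaxBr dictionary + 1) ^ f := by
      rw [List.map_const']
      simp [List.sum_replicate, smul_eq_mul]
    rw [List.map_cons, List.sum_cons, hconst]
    have hlt : children.length * (pvMaxBr dictionary + 1) ^ f < (pvMaxBr dictionary + 1) ^ (f + 1) := by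
      calc children.length * (pvMaxBr dictionary + 1) ^ f
          ≤ pvMaxBr dictionary * (pvMaxBr dictionary + 1) ^ f := Nat.mul_le_mul_right _ hb
        _ < (pvMaxBr dictionary + 1) * (pvMaxBr dictionary + 1) ^ f := by
            exact Nat.mul_lt_mul_of_lt_of_le (Nat.lt_succ_self _) (le_refl _) hx
        _ = (pvMaxBr dictionary + 1) ^ (f + 1) := (pow_succ' _ _).symm
    exact Nat.add_lt_add_right hlt _

def gen_dict_levels_alt (dictionary : List (String × List String)) (node : String) (level : String) (dict_levels : List (String × List String)) : List (String × List String) :=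
  ((genBLoop (PySem.Dict.mk dictionary) [(dictionary.length + 2, node, level)] (PySem.Dict.mk dict_levels)).getD (PySem.Dict.mk dict_levels)).items

-- ===== PRECONDITION & SPEC =====
-- graph-reachability data for Pre_ (a condition on the input graph, not a run of the ports)
def pvSucc (dictionary : List (String × List String)) (n : String) : List String :=
  (PySem.Dict.get? (PySem.Dict.mk dictionary) n).getD []

def pvReach (dictionary : List (String × List String)) : Nat → List String → List String
  | 0, s => s
  | Nat.succ f, s => pvReach dictionary f (s.foldl (fun acc n => PySem.Set.update acc (pvSucc dictionary n)) s)

def pvReachable (dictionary : List (String × List String)) (node : String) : List String :=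
  pvReach dictionary (dictionary.length + 2) (PySem.Set.ofList [node])

-- Pre_ = exactly where Python A returns: every node reachable from `node` is a key of `dictionary`
-- (else KeyError), no reachable cycle (else infinite recursion), and `level` parses as an int
-- whenever int(level) is evaluated, i.e. when the start node has children (else ValueError).
def Pre_gen_dict_levels (dictionary : List (String × List String)) (node : String) (level : String) (dict_levels : List (String × List String)) : Prop :=
  (∀ r ∈ pvReachable dictionary node, PySem.Dict.contains (PySem.Dict.mk dictionary) r = true) ∧
  (∀ r ∈ pvReachable dictionary node, r ∉ pvReach dictionary (dictionary.length + 2) (PySem.Set.ofList (pvSucc dictionary r))) ∧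
  (pvSucc dictionary node ≠ [] → (PySem.Int.ofStr? level).isSome = true)
instance (dictionary : List (String × List String)) (node : String) (level : String) (dict_levels : List (String × List String)) : Decidable (Pre_gen_dict_levels dictionary node level dict_levels) := by unfold Pre_gen_dict_levels; infer_instance

def pvWitness_gen_dict_levels : (List (String × List String)) × String × String × (List (String × List String)) :=
  ([("a", ["b", "b"]), ("b", [])], "a", "0", [("5", ["z"])])

def Spec_gen_dict_levels (dictionary : List (String × List String)) (node : String) (level : String) (dict_levels : List (String × List String)) (out : List (String × List String)) : Prop := out = gen_dict_levels_alt dictionary node level dict_levels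
instance (dictionary : List (String × List String)) (node : String) (level : String) (dict_levels : List (String × List String)) (out : List (String × List String)) : Decidable (Spec_gen_dict_levels dictionary node level dict_levels out) := by unfold Spec_gen_dict_levels; infer_instance

-- ===== CLAIM (what is proved, stated in full; the proofs are below) =====
def Claim_equal_gen_dict_levels : Prop := ∀ (dictionary : List (String × List String)) (node : String) (level : String) (dict_levels : List (String × List String)), Dom_gen_dict_levels dictionary node level dict_levels → Pre_gen_dict_levels dictionary node level dict_levels → Spec_gen_dict_levels dictionary node level dict_levels (gen_dict_levels dictionary node level dict_levels)

-- ===== LEMMAS AND PROOFS =====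

theorem foldl_bind_none {α β : Type} (g : β → α → Option α) (l : List β) :
    l.foldl (fun acc e => acc.bind (g e)) none = none := by
  induction l with
  | nil => rfl
  | cons x xs ih => simpa using ih

theorem foldl_const_none {α β : Type} (l : List β) :
    l.foldl (fun (_ : Option α) (_ : β) => (none : Option α)) none = none := by
  induction l with
  | nil => rfl
  | cons x xs ih => simpa using ih

theorem genBLoop_eq (dictionary : PySem.Dict String (List String)) (stack : List (Nat × String × String)) (d : PySem.Dict String (List String)) :
    genBLoop dictionary stack d =
      stack.foldl (fun acc e => acc.bind (fun dd => genAFuel dictionary e.1 e.2.1 e.2.2 dd)) (some d) := by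
  fun_induction genBLoop dictionary stack d with
  | case1 d => simp
  | case2 d fst snd tail => simp [genAFuel, foldl_bind_none]
  | case3 d f n l rest h => simp [genAFuel, h, foldl_bind_none]
  | case4 d f n l rest d1 children h hEmp ih =>
    rw [List.isEmpty_iff] at hEmp
    subst hEmp
    simpa [genAFuel, h] using ih
  | case5 d f n l rest children h hne hparse =>
    cases children with
    | nil => simp at hne
    | cons c cs => simp [genAFuel, h, hparse, foldl_bind_none, foldl_const_none]
  | case6 d f n l rest d1 children h hne v hparse ih =>
    rw [ih, List.foldl_append, List.foldl_map, List.foldl_cons]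
    congr 1
    simp [genAFuel, h, hparse]
    rfl

-- ===== VERDICT (by name: the statement is the Claim_ definition above) =====
theorem gen_dict_levels_spec : Claim_equal_gen_dict_levels := by
  intro dictionary node level dict_levels _ _
  unfold Spec_gen_dict_levels gen_dict_levels gen_dict_levels_alt
  rw [genBLoop_eq]
  simp
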